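-- pv_equiv track=rewrite | github.com/nishio/atcoder | memo/accum_generation.py | accum_generation
-- ===== SOURCE A (Python) =====
-- def accum_generation(N):
--     """
--     >>> accum_generation(10)
--     [1, 0, 1, 1, 1, 2, 2, 3, 4, 5]
--     """
--     value = [0] * (N + 10)
--     accum = [0] * (N + 10)
--     value[0] = 1
--     accum[0] = 1
--     for pos in range(1, N):
--         ret = (accum[pos - 2] - accum[pos - 4])
--         value[pos] = ret
--         accum[pos] = accum[pos - 1] + ret
--
--     return value[:N]
-- ===== SOURCE B (Python) =====
-- def accum_generation(N):
--     vals = []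
--     for pos in range(N):
--         if pos == 0:
--             vals.append(1)
--         else:
--             a = vals[pos - 2] if pos >= 2 else 0
--             b = vals[pos - 3] if pos >= 3 else 0
--             vals.append(a + b)
--     return vals
-- ===== Notes on version B (the rewrite author's own statement) =====
-- stated objective: simpler
-- what changed: B deletes the prefix-sum array accum and the preallocated zero-padded value buffer entirely: it appends value[pos-2]+value[pos-3] (with explicit zero for out-of-range small pos) to a growing list, instead of maintaining accum and reading the recurrence as a difference accum[pos-2]-accum[pos-4] with negative-index wraparound into zero padding.
-- intended difference: For N in {-4,-3,-2,-1} A returns a non-empty zero-padded prefix such as [1, 0] (an artefact of slicing the [0]*(N+10) buffer with a negative N), while B returns [], the intended value when fewer than one term is requested. — e.g. on accum_generation(-4): A returns [1, 0], B returns []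
import Mathlib
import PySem

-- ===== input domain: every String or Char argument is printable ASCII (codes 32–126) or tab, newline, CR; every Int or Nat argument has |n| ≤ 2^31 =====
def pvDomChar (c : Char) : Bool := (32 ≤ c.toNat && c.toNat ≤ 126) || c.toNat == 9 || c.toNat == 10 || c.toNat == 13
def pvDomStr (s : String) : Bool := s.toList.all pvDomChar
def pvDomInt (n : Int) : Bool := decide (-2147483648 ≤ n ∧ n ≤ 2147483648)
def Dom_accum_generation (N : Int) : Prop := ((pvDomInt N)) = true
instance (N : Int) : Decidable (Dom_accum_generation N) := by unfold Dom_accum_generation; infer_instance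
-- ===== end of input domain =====

-- B drops the accum prefix-sum array and the zero-padded buffer: it appends the
-- recurrence value[pos-2]+value[pos-3] directly to a growing list (objective: simpler).


-- ===== PORT A =====
-- value[pos] / accum[pos] reads and writes use pyGetD/pySetD: inside Pre_ every index
-- Python touches is in range (negative indices wrap), so the defaults are never taken.
def accum_generation (N : Int) : List Int :=
  let value := List.replicate (N + 10).toNat (0 : Int)
  let accum := List.replicate (N + 10).toNat (0 : Int)
  let value := PySem.List.pySetD value 0 1
  let accum := PySem.List.pySetD accum 0 1
  let st := (PySem.List.pyRange 1 N 1).foldl (fun st pos =>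
      let ret := PySem.List.pyGetD st.2 (pos - 2) 0 - PySem.List.pyGetD st.2 (pos - 4) 0
      (PySem.List.pySetD st.1 pos ret,
       PySem.List.pySetD st.2 pos (PySem.List.pyGetD st.2 (pos - 1) 0 + ret)))
    (value, accum)
  PySem.List.slice st.1 none (some N)

-- ===== PORT B =====
def accum_generation_alt (N : Int) : List Int :=
  (PySem.List.pyRange 0 N 1).foldl (fun vals pos =>
    if pos = 0 then vals ++ [1]
    else
      let a := if pos ≥ 2 then PySem.List.pyGetD vals (pos - 2) 0 else 0
      let b := if pos ≥ 3 then PySem.List.pyGetD vals (pos - 3) 0 else 0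
      vals ++ [a + b]) []

-- ===== PRECONDITION & SPEC =====
-- A raises IndexError (value[0] = 1 on an empty list) exactly when N + 10 ≤ 0.
def Pre_accum_generation (N : Int) : Prop := -9 ≤ N
instance (N : Int) : Decidable (Pre_accum_generation N) := by unfold Pre_accum_generation; infer_instance
def pvWitness_accum_generation : Int := 10

-- For N in {-4,-3,-2,-1} A returns a non-empty zero-padded prefix such as [1, 0] (an artefact of
-- slicing the [0]*(N+10) buffer with a negative N), while B returns [], the intended value when
-- fewer than one term is requested.
def D_accum_generation (N : Int) : Prop := -4 ≤ N ∧ N ≤ -1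
instance (N : Int) : Decidable (D_accum_generation N) := by unfold D_accum_generation; infer_instance

def Spec_accum_generation (N : Int) (out : List Int) : Prop := ¬ D_accum_generation N → out = accum_generation_alt N
instance (N : Int) (out : List Int) : Decidable (Spec_accum_generation N out) := by unfold Spec_accum_generation; infer_instance

def pvDiffWitness_accum_generation : Int := -4
def pvDiffWitnessOut_accum_generation : (List Int) × (List Int) := ([1, 0], [])

-- ===== CLAIM (what is proved, stated in full; the proofs are below) =====
def Claim_unchanged_accum_generation : Prop := ∀ (N : Int), Dom_accum_generation N → Pre_accum_generation N → Spec_accum_generation N (accum_generation N)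
def Claim_changed_accum_generation : Prop := Dom_accum_generation (pvDiffWitness_accum_generation) ∧ Pre_accum_generation (pvDiffWitness_accum_generation) ∧ D_accum_generation (pvDiffWitness_accum_generation) ∧ accum_generation (pvDiffWitness_accum_generation) = pvDiffWitnessOut_accum_generation.1 ∧ accum_generation_alt (pvDiffWitness_accum_generation) = pvDiffWitnessOut_accum_generation.2 ∧ pvDiffWitnessOut_accum_generation.1 ≠ pvDiffWitnessOut_accum_generation.2
def Claim_exact_accum_generation : Prop := ∀ (N : Int), Dom_accum_generation N → Pre_accum_generation N → D_accum_generation N → accum_generation N ≠ accum_generation_alt N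

-- ===== LEMMAS AND PROOFS =====

-- the sequence A and B generate, and A's running prefix sums
def pvF : Nat → Int
  | 0 => 1
  | 1 => 0
  | 2 => 1
  | (n + 3) => pvF (n + 1) + pvF n

def pvG : Nat → Int
  | 0 => 1
  | (n + 1) => pvG n + pvF (n + 1)

theorem pvG_sub (k : Nat) : pvG (k + 2) - pvG k = pvF (k + 4) := by
  show pvG (k + 1) + pvF (k + 2) - pvG k = pvF (k + 4)
  show pvG k + pvF (k + 1) + pvF (k + 2) - pvG k = pvF (k + 4)
  have : pvF (k + 4) = pvF (k + 2) + pvF (k + 1) := rfl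
  omega

-- reading a zero-padded list: in-range nonnegative index hits the prefix
theorem pvGetD_pad_pos (l : List Int) (z : Nat) (j : Nat) (h : j < l.length) :
    PySem.List.pyGetD (l ++ List.replicate z (0 : Int)) (j : Int) 0 = l[j] := by
  rw [PySem.List.pyGetD_natCast]
  rw [List.getD_eq_getElem?_getD, List.getElem?_append_left h, List.getElem?_eq_getElem h]
  rfl

-- reading a zero-padded list: a small negative index wraps into the zero tail
theorem pvGetD_pad_neg (l : List Int) (z : Nat) (k : Nat) (hk : 0 < k) (hkz : k ≤ z) :
    PySem.List.pyGetD (l ++ List.replicate z (0 : Int)) (-(k : Int)) 0 = 0 := by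
  have hlen : k ≤ (l ++ List.replicate z (0 : Int)).length := by
    simp [List.length_append]; omega
  rw [PySem.List.pyGetD_neg_natCast _ k 0 hk hlen]
  have h1 : l.length ≤ (l ++ List.replicate z (0 : Int)).length - k := by
    simp [List.length_append]; omega
  rw [List.getElem_append_right h1]
  simp

theorem pvMapF_getD (n j : Nat) (h : j < n) : ((List.range n).map pvF).getD j 0 = pvF j := by
  rw [List.getD_eq_getElem?_getD, List.getElem?_map, List.getElem?_range h]
  rfl

theorem pvB_char (n : Nat) : accum_generation_alt (n : Int) = (List.range n).map pvF := by
  induction n with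
  | zero => decide
  | succ n ih =>
    unfold accum_generation_alt at ih ⊢
    rw [show ((n + 1 : Nat) : Int) = (n : Int) + 1 by push_cast; ring,
        PySem.List.pyRange_one_succ_right (by exact_mod_cast n.zero_le),
        List.foldl_append, ih, List.range_succ, List.map_append]
    dsimp only [List.foldl]
    match n with
    | 0 => decide
    | 1 => decide
    | 2 => decide
    | (k + 3) =>
      rw [if_neg (show ¬((k + 3 : Nat) : Int) = 0 by push_cast; omega),
          if_pos (show ((k + 3 : Nat) : Int) ≥ 2 by push_cast; omega),
          if_pos (show ((k + 3 : Nat) : Int) ≥ 3 by push_cast; omega),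
          show ((k + 3 : Nat) : Int) - 2 = ((k + 1 : Nat) : Int) by push_cast; ring,
          show ((k + 3 : Nat) : Int) - 3 = ((k : Nat) : Int) by push_cast; ring,
          PySem.List.pyGetD_natCast, PySem.List.pyGetD_natCast,
          pvMapF_getD _ _ (by omega), pvMapF_getD _ _ (by omega)]
      rfl

theorem pvSet_pad (l : List Int) (z m : Nat) (hl : l.length = m) (hz : 0 < z) (v : Int) :
    (l ++ List.replicate z (0 : Int)).set m v
      = (l ++ [v]) ++ List.replicate (z - 1) (0 : Int) := by
  subst hl
  obtain ⟨y, rfl⟩ : ∃ y, z = y + 1 := ⟨z - 1, by omega⟩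
  rw [List.set_append_right _ _ le_rfl, Nat.sub_self, List.replicate_succ, List.set_cons_zero]
  simp

theorem pvMapG_get (m j : Nat) (h : j < ((List.range m).map pvG).length) :
    ((List.range m).map pvG)[j] = pvG j := by
  simp

theorem pvA_inv (n : Nat) : ∀ m : Nat, 1 ≤ m → m ≤ n →
    (PySem.List.pyRange 1 (m : Int) 1).foldl
      (fun st pos =>
        let ret := PySem.List.pyGetD st.2 (pos - 2) 0 - PySem.List.pyGetD st.2 (pos - 4) 0
        (PySem.List.pySetD st.1 pos ret,
         PySem.List.pySetD st.2 pos (PySem.List.pyGetD st.2 (pos - 1) 0 + ret)))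
      (PySem.List.pySetD (List.replicate (n + 10) (0 : Int)) 0 1,
       PySem.List.pySetD (List.replicate (n + 10) (0 : Int)) 0 1)
    = ((List.range m).map pvF ++ List.replicate (n + 10 - m) (0 : Int),
       (List.range m).map pvG ++ List.replicate (n + 10 - m) (0 : Int)) := by
  have hinit : PySem.List.pySetD (List.replicate (n + 10) (0 : Int)) 0 1
      = (1 : Int) :: List.replicate (n + 9) (0 : Int) := by
    rw [PySem.List.pySetD_of_nonneg _ _ (by norm_num), show n + 10 = (n + 9) + 1 by omega,
        List.replicate_succ]
    exact List.set_cons_zero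
  intro m
  induction m with
  | zero => intro h; omega
  | succ m ihm =>
    intro _ hle
    rcases Nat.eq_zero_or_pos m with rfl | hm
    · rw [show ((0 + 1 : Nat) : Int) = 1 by norm_num,
          show PySem.List.pyRange 1 1 1 = ([] : List Int) from by decide,
          List.foldl_nil, hinit]
      simp [pvF, pvG]
    · rw [show ((m + 1 : Nat) : Int) = (m : Int) + 1 by omega,
          PySem.List.pyRange_one_succ_right (by exact_mod_cast hm),
          List.foldl_append, ihm hm (by omega), List.foldl_cons, List.foldl_nil]
      dsimp only
      have hzlen : 2 ≤ n + 10 - m := by omega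
      have hret : PySem.List.pyGetD
            ((List.range m).map pvG ++ List.replicate (n + 10 - m) (0 : Int)) ((m : Int) - 2) 0
          - PySem.List.pyGetD
            ((List.range m).map pvG ++ List.replicate (n + 10 - m) (0 : Int)) ((m : Int) - 4) 0
          = pvF m := by
        match m, hm with
        | 1, _ =>
          rw [show ((1 : Nat) : Int) - 2 = -((1 : Nat) : Int) by omega,
              show ((1 : Nat) : Int) - 4 = -((3 : Nat) : Int) by omega,
              pvGetD_pad_neg _ _ 1 (by omega) (by omega),
              pvGetD_pad_neg _ _ 3 (by omega) (by omega)]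
          rfl
        | 2, _ =>
          rw [show ((2 : Nat) : Int) - 2 = ((0 : Nat) : Int) by omega,
              show ((2 : Nat) : Int) - 4 = -((2 : Nat) : Int) by omega,
              pvGetD_pad_pos _ _ 0 (by simp),
              pvGetD_pad_neg _ _ 2 (by omega) (by omega), pvMapG_get]
          rfl
        | 3, _ =>
          rw [show ((3 : Nat) : Int) - 2 = ((1 : Nat) : Int) by omega,
              show ((3 : Nat) : Int) - 4 = -((1 : Nat) : Int) by omega,
              pvGetD_pad_pos _ _ 1 (by simp),
              pvGetD_pad_neg _ _ 1 (by omega) (by omega), pvMapG_get]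
          rfl
        | (k + 4), _ =>
          rw [show ((k + 4 : Nat) : Int) - 2 = ((k + 2 : Nat) : Int) by omega,
              show ((k + 4 : Nat) : Int) - 4 = ((k : Nat) : Int) by omega,
              pvGetD_pad_pos _ _ (k + 2) (by simp),
              pvGetD_pad_pos _ _ k (by simp), pvMapG_get, pvMapG_get]
          exact pvG_sub k
      have haccm1 : PySem.List.pyGetD
            ((List.range m).map pvG ++ List.replicate (n + 10 - m) (0 : Int)) ((m : Int) - 1) 0
          = pvG (m - 1) := by
        rw [show ((m : Nat) : Int) - 1 = ((m - 1 : Nat) : Int) by omega,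
            pvGetD_pad_pos _ _ (m - 1) (by simp; omega), pvMapG_get]
        
      rw [hret, haccm1]
      have hsetF : PySem.List.pySetD
            ((List.range m).map pvF ++ List.replicate (n + 10 - m) (0 : Int)) ((m : Nat) : Int) (pvF m)
          = (List.range (m + 1)).map pvF ++ List.replicate (n + 10 - (m + 1)) (0 : Int) := by
        rw [PySem.List.pySetD_natCast,
            pvSet_pad _ _ m (by simp) (by omega), List.range_succ, List.map_append]
        simp
        omega
      have hsetG : PySem.List.pySetD
            ((List.range m).map pvG ++ List.replicate (n + 10 - m) (0 : Int)) ((m : Nat) : Int) (pvG (m - 1) + pvF m)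
          = (List.range (m + 1)).map pvG ++ List.replicate (n + 10 - (m + 1)) (0 : Int) := by
        have hG : pvG (m - 1) + pvF m = pvG m := by
          obtain ⟨j, rfl⟩ : ∃ j, m = j + 1 := ⟨m - 1, by omega⟩
          rfl
        rw [hG, PySem.List.pySetD_natCast,
            pvSet_pad _ _ m (by simp) (by omega), List.range_succ, List.map_append]
        simp
        omega
      rw [hsetF, hsetG]

theorem pvA_char (n : Nat) (hn : 1 ≤ n) : accum_generation (n : Int) = (List.range n).map pvF := by
  unfold accum_generation
  dsimp only
  rw [show (((n : Nat) : Int) + 10).toNat = n + 10 from by omega,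
      pvA_inv n n hn le_rfl]
  dsimp only
  rw [PySem.List.slice_to_natCast, List.take_left' (by simp)]

-- ===== VERDICT (by name: the statement is the Claim_ definition above) =====
theorem accum_generation_spec : Claim_unchanged_accum_generation := by
  intro N _ hPre hnD
  unfold Pre_accum_generation at hPre
  unfold D_accum_generation at hnD
  by_cases hpos : 1 ≤ N
  · have hn : N = ((N.toNat : Nat) : Int) := by omega
    rw [hn, pvA_char N.toNat (by omega), pvB_char]
  · have h0 : -9 ≤ N ∧ N ≤ 0 := ⟨hPre, by omega⟩
    have hD' : N < -4 ∨ -1 < N := by omega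
    interval_cases N <;> first | (exfalso; omega) | decide

theorem accum_generation_changed : Claim_changed_accum_generation := by
  unfold Claim_changed_accum_generation; decide

theorem accum_generation_tight : Claim_exact_accum_generation := by
  intro N _ _ hD
  unfold D_accum_generation at hD
  obtain ⟨h1, h2⟩ := hD
  interval_cases N <;> decide
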